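-- pv_equiv track=rewrite | github.com/benihyangbaik/boithos | research/step_one/data/prepare_corpora.py | split_at_key
-- ===== SOURCE A (Python) =====
-- from collections import OrderedDict
--
-- def split_at_key(split_key, od):
--     lo = OrderedDict()
--     hi = OrderedDict()
--     tgt = lo
--     for k, v in od.items():
--         if k.startswith(split_key):
--             tgt = hi
--         tgt[k] = v
--     return lo, hi
-- ===== SOURCE B (Python) =====
-- from collections import OrderedDict
--
-- def split_at_key(split_key, od):
--     items = list(od.items())
--     idx = next((i for i, (k, _) in enumerate(items) if k.startswith(split_key)), len(items))
--     return OrderedDict(items[:idx]), OrderedDict(items[idx:])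
-- ===== Notes on version B (the rewrite author's own statement) =====
-- stated objective: simpler
-- what changed: replaces the running mutable-target loop with find-the-first-matching-index then two slices
import Mathlib
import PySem

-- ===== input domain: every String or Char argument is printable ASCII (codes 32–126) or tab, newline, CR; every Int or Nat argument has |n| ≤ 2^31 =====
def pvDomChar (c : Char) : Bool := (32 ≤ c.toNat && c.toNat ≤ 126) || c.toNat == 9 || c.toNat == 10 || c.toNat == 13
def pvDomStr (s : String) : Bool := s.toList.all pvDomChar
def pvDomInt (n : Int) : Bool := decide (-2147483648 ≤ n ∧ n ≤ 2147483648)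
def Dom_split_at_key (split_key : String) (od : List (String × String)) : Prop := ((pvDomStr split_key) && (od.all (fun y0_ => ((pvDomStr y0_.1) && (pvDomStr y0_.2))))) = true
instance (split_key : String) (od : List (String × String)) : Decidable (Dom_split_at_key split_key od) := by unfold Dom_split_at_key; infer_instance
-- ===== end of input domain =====

-- B replaces A's running mutable-target loop with find-the-boundary-index-then-slice (objective: simpler).
-- ===== PORT A =====
-- A's loop: tgt starts at lo, switches permanently to hi at the first key with k.startswith(split_key);
-- state = (lo, hi, tgtIsHi). Dict assignment tgt[k] = v is appended (keys of an OrderedDict are unique).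
def splitStep (split_key : String)
    (st : (List (String × String)) × (List (String × String)) × Bool) (kv : String × String) :
    (List (String × String)) × (List (String × String)) × Bool :=
  let tgtIsHi := if PySem.Str.startswith kv.1 split_key then true else st.2.2
  if tgtIsHi then (st.1, st.2.1 ++ [kv], tgtIsHi) else (st.1 ++ [kv], st.2.1, tgtIsHi)

def split_at_key (split_key : String) (od : List (String × String)) : (List (String × String)) × (List (String × String)) :=
  let st := od.foldl (splitStep split_key) ([], [], false)
  (st.1, st.2.1)

-- ===== PORT B =====
-- Source B: idx = next((i for i,(k,_) in enumerate(items) if k.startswith(split_key)), len(items));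
-- List.findIdx returns the length when no element matches, exactly the 'next' default.
def split_at_key_alt (split_key : String) (od : List (String × String)) : (List (String × String)) × (List (String × String)) :=
  let idx := od.findIdx (fun kv => PySem.Str.startswith kv.1 split_key)
  (od.take idx, od.drop idx)

-- ===== PRECONDITION & SPEC =====
def Spec_split_at_key (split_key : String) (od : List (String × String)) (out : (List (String × String)) × (List (String × String))) : Prop := out = split_at_key_alt split_key od
instance (split_key : String) (od : List (String × String)) (out : (List (String × String)) × (List (String × String))) : Decidable (Spec_split_at_key split_key od out) := by unfold Spec_split_at_key; infer_instance

-- ===== CLAIM (what is proved, stated in full; the proofs are below) =====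
def Claim_equal_split_at_key : Prop := ∀ (split_key : String) (od : List (String × String)), Dom_split_at_key split_key od → Spec_split_at_key split_key od (split_at_key split_key od)

-- ===== LEMMAS AND PROOFS =====
-- once the flag is true, every remaining pair is appended to hi
theorem foldl_hi (split_key : String) (od lo hi : List (String × String)) :
    od.foldl (splitStep split_key) (lo, hi, true) = (lo, hi ++ od, true) := by
  induction od generalizing hi with
  | nil => simp
  | cons kv rest ih =>
    rw [List.foldl_cons]
    have hstep : splitStep split_key (lo, hi, true) kv = (lo, hi ++ [kv], true) := by
      simp [splitStep]
    rw [hstep, ih]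
    simp


-- ===== VERDICT (by name: the statement is the Claim_ definition above) =====
theorem foldl_split (split_key : String) (od lo hi : List (String × String)) :
    od.foldl (splitStep split_key) (lo, hi, false) = (lo ++ od.take (od.findIdx (fun kv => PySem.Str.startswith kv.1 split_key)),
       hi ++ od.drop (od.findIdx (fun kv => PySem.Str.startswith kv.1 split_key)),
       od.any (fun kv => PySem.Str.startswith kv.1 split_key)) := by
  induction od generalizing lo hi with
  | nil => simp
  | cons kv rest ih =>
    rw [List.foldl_cons]
    by_cases h : PySem.Chars.startswith kv.1.toList split_key.toList = true
    · have hstep : splitStep split_key (lo, hi, false) kv = (lo, hi ++ [kv], true) := by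
        simp [splitStep, h]
      rw [hstep, foldl_hi]
      simp [List.findIdx_cons, h]
    · have hstep : splitStep split_key (lo, hi, false) kv = (lo ++ [kv], hi, false) := by
        simp [splitStep, h]
      rw [hstep, ih]
      simp [List.findIdx_cons, h]

theorem split_at_key_spec : Claim_equal_split_at_key := by
  intro split_key od _
  unfold Spec_split_at_key split_at_key split_at_key_alt
  rw [foldl_split]
  simp
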